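-- pv_equiv track=rewrite | github.com/RickyKDP/Recursive-Data-Pruning-CNN | CNN/model.py | compute_single_label
-- ===== SOURCE A (Python) =====
-- def compute_single_label(listt):
--     result=[]
--     length=len(listt)
--     for i,e in enumerate(listt):
--         previous=listt[i-1] if i>0 else 0
--         current=listt[i]
--         next=listt[i+1] if i<length-1 else 0
--         summ=previous+current+next
--         if summ>=2:
--             summ=1
--         else:
--             summ=0
--         result.append(summ)
--     return result
-- ===== SOURCE B (Python) =====
-- def compute_single_label(listt):
--     # Two staged passes via a prefix-sum table: window sum = prefix[min(i+2,n)] - prefix[max(i-1,0)].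
--     prefix = [0]
--     s = 0
--     for x in listt:
--         s += x
--         prefix.append(s)
--     n = len(listt)
--     return [1 if prefix[min(i + 2, n)] - prefix[max(i - 1, 0)] >= 2 else 0
--             for i in range(n)]
-- ===== Notes on version B (the rewrite author's own statement) =====
-- stated objective: alternative
-- what changed: Replaces per-element neighbor lookups with boundary conditionals by a staged prefix-sum table: one pass accumulates running sums, a second pass reads each window as a clamped prefix difference.
import Mathlib
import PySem

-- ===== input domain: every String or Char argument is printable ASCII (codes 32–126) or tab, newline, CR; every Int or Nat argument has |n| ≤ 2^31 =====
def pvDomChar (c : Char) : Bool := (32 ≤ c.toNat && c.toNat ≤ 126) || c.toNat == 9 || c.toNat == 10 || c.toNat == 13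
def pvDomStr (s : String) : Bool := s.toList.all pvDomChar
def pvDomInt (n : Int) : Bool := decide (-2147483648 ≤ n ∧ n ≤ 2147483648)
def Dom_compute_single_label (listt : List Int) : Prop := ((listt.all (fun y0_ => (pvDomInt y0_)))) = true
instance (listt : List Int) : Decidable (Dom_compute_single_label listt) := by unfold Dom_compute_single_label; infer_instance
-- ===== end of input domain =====

-- B replaces A's per-element neighbor lookups and boundary conditionals by a staged
-- prefix-sum table: window sum = prefix[min(i+2,n)] - prefix[max(i-1,0)] (alternative; same cost).

-- ===== PORT A =====
-- Literal port of A: fold over enumerate(listt), each step reading neighbors by index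
-- (indices are always in range in Python, so pyGetD's default is never used).
def compute_single_label (listt : List Int) : List Int :=
  (PySem.List.enumerate listt 0).foldl (fun result ie =>
    let i := ie.1
    let previous := if i > 0 then PySem.List.pyGetD listt (i - 1) 0 else 0
    let current := PySem.List.pyGetD listt i 0
    let next := if i < (listt.length : Int) - 1 then PySem.List.pyGetD listt (i + 1) 0 else 0
    let summ := previous + current + next
    result ++ [if summ ≥ 2 then (1 : Int) else 0]) []

-- ===== PORT B =====
-- Literal port of B: the loop builds (prefix, s) by appending each new running sum,
-- then a comprehension over range(n) reads each window as a clamped prefix difference.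
def compute_single_label_alt (listt : List Int) : List Int :=
  let ps := listt.foldl (fun (acc : List Int × Int) x =>
      let s := acc.2 + x
      (acc.1 ++ [s], s)) ([0], 0)
  let pre := ps.1
  let n : Int := listt.length
  (PySem.List.pyRange 0 n 1).map (fun i =>
    if PySem.List.pyGetD pre (min (i + 2) n) 0 - PySem.List.pyGetD pre (max (i - 1) 0) 0 ≥ 2
    then (1 : Int) else 0)

-- ===== PRECONDITION & SPEC =====
def Spec_compute_single_label (listt : List Int) (out : List Int) : Prop := out = compute_single_label_alt listt
instance (listt : List Int) (out : List Int) : Decidable (Spec_compute_single_label listt out) := by unfold Spec_compute_single_label; infer_instance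

-- ===== CLAIM (what is proved, stated in full; the proofs are below) =====
def Claim_equal_compute_single_label : Prop := ∀ (listt : List Int), Dom_compute_single_label listt → Spec_compute_single_label listt (compute_single_label listt)

-- ===== LEMMAS AND PROOFS =====

-- the prefix loop builds acc ++ the running sums starting from s
theorem pv_prefix_loop (xs : List Int) (acc : List Int) (s : Int) :
    (xs.foldl (fun (acc : List Int × Int) x =>
        let t := acc.2 + x
        (acc.1 ++ [t], t)) (acc, s)).1
      = acc ++ (List.range xs.length).map (fun j => s + (xs.take (j + 1)).sum) := by
  induction xs generalizing acc s with
  | nil => simp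
  | cons x xs ih =>
    simp only [List.foldl_cons, ih, List.length_cons, List.range_succ_eq_map]
    simp [List.append_assoc, List.map_map, Function.comp_def, add_assoc]

-- the prefix table is the map of partial sums over range (n+1)
theorem pv_prefix (listt : List Int) :
    (listt.foldl (fun (acc : List Int × Int) x =>
        let t := acc.2 + x
        (acc.1 ++ [t], t)) ([0], 0)).1
      = (List.range (listt.length + 1)).map (fun j => (listt.take j).sum) := by
  rw [pv_prefix_loop, List.range_succ_eq_map]
  simp

-- the clamped prefix difference is exactly A's three-neighbor window sum
theorem pv_window (l : List Int) (k : Nat) (hn : k < l.length) :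
    (l.take (min (k + 2) l.length)).sum - (l.take (k - 1)).sum
      = (if 0 < k then l.getD (k - 1) 0 else 0) + l.getD k 0
        + (if k < l.length - 1 then l.getD (k + 1) 0 else 0) := by
  rw [List.getD_eq_getElem _ _ hn]
  by_cases h1 : 0 < k
  · rw [if_pos h1, List.getD_eq_getElem _ _ (by omega : k - 1 < l.length)]
    have sk := List.sum_take_succ l (k - 1) (by omega)
    rw [show k - 1 + 1 = k by omega] at sk
    have sk1 := List.sum_take_succ l k hn
    by_cases h2 : k < l.length - 1
    · rw [if_pos h2, List.getD_eq_getElem _ _ (by omega : k + 1 < l.length)]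
      have sk2 := List.sum_take_succ l (k + 1) (by omega)
      rw [show min (k + 2) l.length = k + 1 + 1 by omega, sk2, sk1, sk]
      ring
    · rw [if_neg h2]
      rw [show min (k + 2) l.length = k + 1 by omega, sk1, sk]
      ring
  · rw [if_neg h1]
    have hk0 : k = 0 := by omega
    subst hk0
    simp only [Nat.zero_sub, List.take_zero, List.sum_nil, sub_zero]
    have s0 := List.sum_take_succ l 0 hn
    by_cases h2 : 0 < l.length - 1
    · rw [if_pos h2, List.getD_eq_getElem _ _ (by omega : 0 + 1 < l.length)]
      have s1 := List.sum_take_succ l 1 (by omega)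
      rw [show min (0 + 2) l.length = 1 + 1 by omega, s1, s0]
      simp
    · rw [if_neg h2]
      rw [show min (0 + 2) l.length = 0 + 1 by omega, s0]
      simp

theorem compute_single_label_spec : Claim_equal_compute_single_label := by
  intro listt _
  unfold Spec_compute_single_label compute_single_label compute_single_label_alt
  rw [PySem.List.foldl_append_singleton_eq_map, List.nil_append]
  simp only [pv_prefix]
  apply List.ext_getElem
  · simp [PySem.List.length_enumerate, PySem.List.length_pyRange_one]
  · intro k hk hk'
    have hn : k < listt.length := by
      simpa [PySem.List.length_enumerate] using hk
    simp only [List.getElem_map, PySem.List.getElem_enumerate,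
      PySem.List.getElem_pyRange_one, zero_add]
    -- rewrite B's two prefix reads as partial sums at clamped Nat indices
    have hmin : min ((k : Int) + 2) (listt.length : Int)
        = ((min (k + 2) listt.length : Nat) : Int) := by omega
    have hmax : max ((k : Int) - 1) 0 = ((k - 1 : Nat) : Int) := by omega
    rw [hmin, hmax]
    -- rewrite A's three neighbor reads into the same getD form
    have hA : (if (k : Int) > 0 then PySem.List.pyGetD listt ((k : Int) - 1) 0 else 0)
        = (if 0 < k then listt.getD (k - 1) 0 else 0) := by
      by_cases h : 0 < k
      · rw [if_pos (by exact_mod_cast h), if_pos h,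
          show (k : Int) - 1 = ((k - 1 : Nat) : Int) by omega, PySem.List.pyGetD_natCast]
      · rw [if_neg (by omega), if_neg h]
    have hB : PySem.List.pyGetD listt (k : Int) 0 = listt.getD k 0 :=
      PySem.List.pyGetD_natCast listt k 0
    have hC : (if (k : Int) < (listt.length : Int) - 1
          then PySem.List.pyGetD listt ((k : Int) + 1) 0 else 0)
        = (if k < listt.length - 1 then listt.getD (k + 1) 0 else 0) := by
      by_cases h : k < listt.length - 1
      · rw [if_pos (by omega), if_pos h,
          show (k : Int) + 1 = ((k + 1 : Nat) : Int) by omega, PySem.List.pyGetD_natCast]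
      · rw [if_neg (by omega), if_neg h]
    rw [hA, hB, hC, PySem.List.pyGetD_natCast, PySem.List.pyGetD_natCast,
      PySem.List.getD_map_range _ _ _ _ (by omega),
      PySem.List.getD_map_range _ _ _ _ (by omega),
      pv_window listt k hn]
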